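-- pv_equiv track=rewrite | github.com/muy3938-creator/NL2SQL | deepeye/schema_linking.py | _filter_schema_str
-- ===== SOURCE A (Python) =====
-- from typing import List, Dict, Set
--
-- def _filter_schema_str(full_schema: str, relevant_tables: Set[str]) -> str:
--     # Simple line-based filter
--     lines = full_schema.split('\n')
--     filtered = []
--     keep = False
--     for line in lines:
--         if line.strip().startswith("CREATE TABLE"):
--             table_name = line.split()[2]
--             if table_name in relevant_tables:
--                 keep = True
--             else:
--                 keep = False
--
--         if keep:
--             filtered.append(line)
--
--     if not filtered:
--         return full_schema # Fallback
--
--     return "\n".join(filtered)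
-- ===== SOURCE B (Python) =====
-- def _filter_schema_str(full_schema: str, relevant_tables) -> str:
--     # Block-based: group lines into CREATE TABLE blocks, keep whole blocks whose
--     # header's third token is relevant; fall back to the full schema if nothing kept.
--     def is_header(line):
--         return line.strip().startswith("CREATE TABLE")
--
--     lines = full_schema.split('\n')
--     blocks = []
--     i, n = 0, len(lines)
--     while i < n:
--         if is_header(lines[i]):
--             j = i + 1
--             while j < n and not is_header(lines[j]):
--                 j += 1
--             blocks.append(lines[i:j])
--             i = j
--         else:
--             i += 1
--
--     kept = [ln for b in blocks if b[0].split()[2] in relevant_tables for ln in b]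
--     return "\n".join(kept) if kept else full_schema
-- ===== Notes on version B (the rewrite author's own statement) =====
-- stated objective: alternative
-- what changed: Replaces A's single pass with a stateful keep-flag by a two-phase decomposition: first group lines into CREATE TABLE blocks (span-based grouping, pre-header lines dropped), then filter whole blocks by the header's third token and concatenate; same fallback to the full schema when nothing is kept.
import Mathlib
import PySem

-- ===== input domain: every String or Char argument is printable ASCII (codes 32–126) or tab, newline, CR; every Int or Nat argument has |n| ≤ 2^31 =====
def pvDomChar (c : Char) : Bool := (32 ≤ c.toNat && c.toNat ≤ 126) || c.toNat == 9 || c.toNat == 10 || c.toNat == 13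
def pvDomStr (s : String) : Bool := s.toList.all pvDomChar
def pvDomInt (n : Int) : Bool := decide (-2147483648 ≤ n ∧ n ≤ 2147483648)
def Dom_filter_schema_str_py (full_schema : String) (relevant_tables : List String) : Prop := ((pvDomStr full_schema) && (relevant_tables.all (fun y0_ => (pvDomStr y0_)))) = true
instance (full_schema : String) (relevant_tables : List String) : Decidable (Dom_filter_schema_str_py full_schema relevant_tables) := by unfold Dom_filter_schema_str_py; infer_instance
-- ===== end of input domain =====

-- B regroups the schema into CREATE TABLE blocks and filters whole blocks (alternative decomposition, same cost);
-- Pre_ excludes inputs where both programs raise IndexError (a header with fewer than 3 tokens).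

-- line.strip().startswith("CREATE TABLE")  (used by both Pythons)
def pvHdr (line : String) : Bool := PySem.Str.startswith (PySem.Str.strip line) "CREATE TABLE"

-- s.split('\n')  (exact: the separator is non-empty, so split? never returns none)
def pvSplitLines (s : String) : List String := (PySem.Str.split? s "\n").getD []

-- ===== PORT A =====
-- loop body of A: update keep on a header line, then append the line if keep
def pvStepA (relevant_tables : List String) (st : List String × Bool) (line : String) : List String × Bool :=
  let st :=
    if pvHdr line then
      match PySem.List.pyGet? (PySem.Str.split₀ line) 2 with
      | some tn => (st.1, relevant_tables.contains tn)
      | none => st  -- IndexError in Python; excluded by Pre_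
    else st
  if st.2 then (st.1 ++ [line], st.2) else st

def filter_schema_str_py (full_schema : String) (relevant_tables : List String) : String :=
  let lines := pvSplitLines full_schema
  let st := lines.foldl (pvStepA relevant_tables) ([], false)
  if st.1 = [] then full_schema else PySem.Str.join "\n" st.1

-- ===== PORT B =====
-- group lines into blocks: each block is a header line plus the non-header lines after it
def pvBlocks : List String → List (List String)
  | [] => []
  | l :: ls =>
    if pvHdr l then
      let s := ls.span (fun x => !pvHdr x)
      (l :: s.1) :: pvBlocks s.2
    else pvBlocks ls
termination_by ls => ls.length
decreasing_by
  · simp only [List.span_eq_takeWhile_dropWhile]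
    exact Nat.lt_succ_of_le (List.length_dropWhile_le _ _)
  · simp

-- keep a block iff its header's third whitespace token is relevant
def pvBlockKeep (relevant_tables : List String) (b : List String) : Bool :=
  match PySem.List.pyGet? (PySem.Str.split₀ (b.headD "")) 2 with
  | some tn => relevant_tables.contains tn
  | none => false  -- IndexError in Python; excluded by Pre_

def filter_schema_str_py_alt (full_schema : String) (relevant_tables : List String) : String :=
  let lines := pvSplitLines full_schema
  let kept := ((pvBlocks lines).filter (pvBlockKeep relevant_tables)).flatten
  if kept = [] then full_schema else PySem.Str.join "\n" kept

-- ===== PRECONDITION & SPEC =====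
-- Pre_ excludes exactly the inputs on which A raises IndexError: a line whose stripped form
-- starts with "CREATE TABLE" but which has fewer than 3 whitespace tokens.
def Pre_filter_schema_str_py (full_schema : String) (relevant_tables : List String) : Prop :=
  ∀ line ∈ pvSplitLines full_schema, pvHdr line = true → 3 ≤ (PySem.Str.split₀ line).length
instance (full_schema : String) (relevant_tables : List String) : Decidable (Pre_filter_schema_str_py full_schema relevant_tables) := by unfold Pre_filter_schema_str_py; infer_instance

def pvWitness_filter_schema_str_py : String × List String :=
  ("CREATE TABLE users (\n  id int\n)\nCREATE TABLE logs (\n  t int\n)", ["users"])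

def Spec_filter_schema_str_py (full_schema : String) (relevant_tables : List String) (out : String) : Prop := out = filter_schema_str_py_alt full_schema relevant_tables
instance (full_schema : String) (relevant_tables : List String) (out : String) : Decidable (Spec_filter_schema_str_py full_schema relevant_tables out) := by unfold Spec_filter_schema_str_py; infer_instance

-- ===== CLAIM (what is proved, stated in full; the proofs are below) =====
def Claim_equal_filter_schema_str_py : Prop := ∀ (full_schema : String) (relevant_tables : List String), Dom_filter_schema_str_py full_schema relevant_tables → Pre_filter_schema_str_py full_schema relevant_tables → Spec_filter_schema_str_py full_schema relevant_tables (filter_schema_str_py full_schema relevant_tables)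

-- ===== LEMMAS AND PROOFS =====

theorem pvWitness_ok :
    Dom_filter_schema_str_py pvWitness_filter_schema_str_py.1 pvWitness_filter_schema_str_py.2 ∧
    Pre_filter_schema_str_py pvWitness_filter_schema_str_py.1 pvWitness_filter_schema_str_py.2 := by
  decide

-- a header line with ≥ 3 tokens yields a token at index 2
theorem pyGet2_some {xs : List String} (h : 3 ≤ xs.length) :
    PySem.List.pyGet? xs 2 = some xs[2] := by
  have : (2:Nat) < xs.length := by omega
  simpa using PySem.List.pyGet?_ofNat (xs := xs) (n := 2) this

-- folding A's step over header-free lines appends them all iff keep is set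
theorem fold_noHdr (rel : List String) (body : List String) (acc : List String) (k : Bool)
    (h : ∀ x ∈ body, pvHdr x = false) :
    body.foldl (pvStepA rel) (acc, k) = (acc ++ (if k then body else []), k) := by
  induction body generalizing acc with
  | nil => simp
  | cons x xs ih =>
    have hx : pvHdr x = false := h x (List.mem_cons_self)
    have hxs : ∀ y ∈ xs, pvHdr y = false := fun y hy => h y (List.mem_cons_of_mem _ hy)
    simp only [List.foldl_cons]
    have hstep : pvStepA rel (acc, k) x = (acc ++ (if k then [x] else []), k) := by
      simp [pvStepA, hx]; cases k <;> simp
    rw [hstep, ih _ hxs]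
    cases k <;> simp

theorem takeWhile_dropWhile_nil {α : Type} (p : α → Bool) :
    ∀ l : List α, (l.dropWhile p).takeWhile p = [] := by
  intro l
  induction l with
  | nil => simp
  | cons x xs ih =>
    by_cases hx : p x = true
    · simp [hx, ih]
    · simp at hx; simp [hx]

-- main invariant: A's fold computes the pre-header carry plus the flattened kept blocks
theorem fold_blocks (rel : List String) :
    ∀ (n : Nat) (lines : List String), lines.length ≤ n →
    (∀ l ∈ lines, pvHdr l = true → 3 ≤ (PySem.Str.split₀ l).length) →
    ∀ (acc : List String) (k : Bool),
    (lines.foldl (pvStepA rel) (acc, k)).1 =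
      acc ++ (if k then lines.takeWhile (fun x => !pvHdr x) else [])
          ++ ((pvBlocks lines).filter (pvBlockKeep rel)).flatten := by
  intro n
  induction n with
  | zero =>
    intro lines hlen _ acc k
    have : lines = [] := List.eq_nil_of_length_eq_zero (Nat.le_zero.mp hlen)
    subst this; simp [pvBlocks]
  | succ n ih =>
    intro lines hlen hpre acc k
    cases lines with
    | nil => simp [pvBlocks]
    | cons l ls =>
      by_cases hl : pvHdr l = true
      · -- header line
        have h3 : 3 ≤ (PySem.Str.split₀ l).length := hpre l List.mem_cons_self hl
        set tn := (PySem.Str.split₀ l)[2] with htn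
        have hget : PySem.List.pyGet? (PySem.Str.split₀ l) 2 = some tn := pyGet2_some h3
        obtain ⟨kp, hkp⟩ : ∃ kp, rel.contains tn = kp := ⟨_, rfl⟩
        have hstep : pvStepA rel (acc, k) l = (acc ++ (if kp then [l] else []), kp) := by
          simp only [pvStepA, hl, if_true, hget]
          cases kp <;> simp [List.contains_eq_mem] at hkp <;> simp [hkp]
        set body := ls.takeWhile (fun x => !pvHdr x) with hbody
        set rest := ls.dropWhile (fun x => !pvHdr x) with hrest
        have hsplit : ls = body ++ rest := (List.takeWhile_append_dropWhile).symm
        have hbodyNoHdr : ∀ x ∈ body, pvHdr x = false := by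
          intro x hx
          have := List.mem_takeWhile_imp hx
          simpa using this
        have hrestlen : rest.length ≤ n := by
          have h1 : rest.length ≤ ls.length := List.length_dropWhile_le _ _
          simp at hlen; omega
        have hrestpre : ∀ x ∈ rest, pvHdr x = true → 3 ≤ (PySem.Str.split₀ x).length := by
          intro x hx
          exact hpre x (List.mem_cons_of_mem _ ((List.dropWhile_sublist _).subset hx))
        have hblocks : pvBlocks (l :: ls) = (l :: body) :: pvBlocks rest := by
          rw [pvBlocks]
          simp [hl, List.span_eq_takeWhile_dropWhile, ← hbody, ← hrest]
        have hkeepblk : pvBlockKeep rel (l :: body) = kp := by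
          simp only [pvBlockKeep, List.headD_cons, hget]
          simpa [List.contains_eq_mem] using hkp
        have htw : (l :: ls).takeWhile (fun x => !pvHdr x) = [] := by
          simp [hl]
        have htwrest : rest.takeWhile (fun x => !pvHdr x) = [] := by
          rw [hrest]; exact takeWhile_dropWhile_nil _ _
        calc ((l :: ls).foldl (pvStepA rel) (acc, k)).1
            = ((body ++ rest).foldl (pvStepA rel) (acc ++ (if kp then [l] else []), kp)).1 := by
              rw [List.foldl_cons, hstep, ← hsplit]
          _ = (rest.foldl (pvStepA rel)
                (acc ++ (if kp then [l] else []) ++ (if kp then body else []), kp)).1 := by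
              rw [List.foldl_append, fold_noHdr rel body _ kp hbodyNoHdr]
          _ = acc ++ (if kp then [l] else []) ++ (if kp then body else [])
                ++ (if kp then rest.takeWhile (fun x => !pvHdr x) else [])
                ++ ((pvBlocks rest).filter (pvBlockKeep rel)).flatten := by
              rw [ih rest hrestlen hrestpre]
          _ = acc ++ (if k then (l :: ls).takeWhile (fun x => !pvHdr x) else [])
                ++ ((pvBlocks (l :: ls)).filter (pvBlockKeep rel)).flatten := by
              rw [htw, htwrest, hblocks]
              simp only [List.filter_cons, hkeepblk]
              cases kp <;> simp
      · -- non-header line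
        simp at hl
        have hstep : pvStepA rel (acc, k) l = (acc ++ (if k then [l] else []), k) := by
          simp [pvStepA, hl]; cases k <;> simp
        have hlen' : ls.length ≤ n := by simp at hlen; omega
        have hpre' : ∀ x ∈ ls, pvHdr x = true → 3 ≤ (PySem.Str.split₀ x).length :=
          fun x hx => hpre x (List.mem_cons_of_mem _ hx)
        have hblocks : pvBlocks (l :: ls) = pvBlocks ls := by rw [pvBlocks]; simp [hl]
        rw [List.foldl_cons, hstep, ih ls hlen' hpre' _ k, hblocks]
        simp [hl]
        cases k <;> simp

-- ===== VERDICT (by name: the statement is the Claim_ definition above) =====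
theorem filter_schema_str_py_spec : Claim_equal_filter_schema_str_py := by
  intro full_schema rel _hdom hpre
  unfold Spec_filter_schema_str_py filter_schema_str_py filter_schema_str_py_alt
  set lines := pvSplitLines full_schema with hlines
  have hmain := fold_blocks rel lines.length lines le_rfl hpre [] false
  simp only [Bool.false_eq_true, if_false, List.nil_append] at hmain
  simp [hmain]
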